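-- pv_equiv track=rewrite | github.com/Kenjiro-study/my_study | craigslistbargain/model/generator.py | ambiguous_template
-- ===== SOURCE A (Python) =====
-- def ambiguous_template(template):
--     """曖昧さがあるかどうかを確認し, 曖昧さがある場合はテンプレートを破棄する
--     """
--     if len(template) == 0:
--         return True
--     num_prices = sum([1 if token == '{price}' else 0 for token in template])
--     if num_prices > 1:
--         return True
--     num_titles = sum([1 if token == '{title}' else 0 for token in template])
--     if num_titles > 1:
--         return True
--     return False
-- ===== SOURCE B (Python) =====
-- def ambiguous_template(template):
--     if len(template) == 0:
--         return True
--     prices = 0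
--     titles = 0
--     for token in template:
--         if token == '{price}':
--             prices += 1
--             if prices > 1:
--                 return True
--         elif token == '{title}':
--             titles += 1
--             if titles > 1:
--                 return True
--     return False
-- ===== Notes on version B (the rewrite author's own statement) =====
-- stated objective: alternative
-- what changed: Replaced A's two sequential full counting passes (sum over list comprehensions) by a single early-exit loop that maintains both counters and returns True as soon as one exceeds 1.
import Mathlib
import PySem

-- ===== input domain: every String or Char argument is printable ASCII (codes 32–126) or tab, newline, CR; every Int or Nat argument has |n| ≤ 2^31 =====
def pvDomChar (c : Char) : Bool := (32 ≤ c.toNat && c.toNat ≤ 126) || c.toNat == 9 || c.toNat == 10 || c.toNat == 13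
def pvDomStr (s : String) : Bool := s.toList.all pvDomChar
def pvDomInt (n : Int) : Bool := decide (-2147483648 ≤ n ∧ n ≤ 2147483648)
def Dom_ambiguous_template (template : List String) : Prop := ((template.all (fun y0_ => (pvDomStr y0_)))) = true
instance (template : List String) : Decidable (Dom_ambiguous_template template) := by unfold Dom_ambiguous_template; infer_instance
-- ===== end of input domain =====

-- B replaces A's two sequential full counting passes by one early-exit loop with two counters (objective: alternative decomposition).
-- ===== PORT A =====
def ambiguous_template (template : List String) : Bool :=
  if template.length = 0 then true
  else
    let num_prices : Int := (template.map (fun token => if token = "{price}" then (1 : Int) else 0)).sum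
    if num_prices > 1 then true
    else
      let num_titles : Int := (template.map (fun token => if token = "{title}" then (1 : Int) else 0)).sum
      if num_titles > 1 then true
      else false

-- ===== PORT B =====
def ambiguous_template_alt_loop : List String → Int → Int → Bool
  | [], _, _ => false
  | token :: rest, prices, titles =>
    if token = "{price}" then
      if prices + 1 > 1 then true else ambiguous_template_alt_loop rest (prices + 1) titles
    else if token = "{title}" then
      if titles + 1 > 1 then true else ambiguous_template_alt_loop rest prices (titles + 1)
    else ambiguous_template_alt_loop rest prices titles

def ambiguous_template_alt (template : List String) : Bool :=
  if template.length = 0 then true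
  else ambiguous_template_alt_loop template 0 0

-- ===== PRECONDITION & SPEC =====
def Spec_ambiguous_template (template : List String) (out : Bool) : Prop := out = ambiguous_template_alt template
instance (template : List String) (out : Bool) : Decidable (Spec_ambiguous_template template out) := by unfold Spec_ambiguous_template; infer_instance

-- ===== CLAIM (what is proved, stated in full; the proofs are below) =====
def Claim_equal_ambiguous_template : Prop := ∀ (template : List String), Dom_ambiguous_template template → Spec_ambiguous_template template (ambiguous_template template)

-- ===== LEMMAS AND PROOFS =====
def pvPriceSum (xs : List String) : Int := (xs.map (fun token => if token = "{price}" then (1 : Int) else 0)).sum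
def pvTitleSum (xs : List String) : Int := (xs.map (fun token => if token = "{title}" then (1 : Int) else 0)).sum

lemma pvPriceSum_nonneg (xs : List String) : 0 ≤ pvPriceSum xs := by
  induction xs with
  | nil => simp [pvPriceSum]
  | cons x xs ih =>
    simp only [pvPriceSum, List.map_cons, List.sum_cons] at *
    split <;> omega

lemma pvTitleSum_nonneg (xs : List String) : 0 ≤ pvTitleSum xs := by
  induction xs with
  | nil => simp [pvTitleSum]
  | cons x xs ih =>
    simp only [pvTitleSum, List.map_cons, List.sum_cons] at *
    split <;> omega

lemma alt_loop_eq (xs : List String) (p t : Int) (hp : p ≤ 1) (ht : t ≤ 1) :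
    ambiguous_template_alt_loop xs p t = decide (p + pvPriceSum xs > 1 ∨ t + pvTitleSum xs > 1) := by
  induction xs generalizing p t with
  | nil => simp [ambiguous_template_alt_loop, pvPriceSum, pvTitleSum]; omega
  | cons x xs ih =>
    have hps := pvPriceSum_nonneg xs
    have hts := pvTitleSum_nonneg xs
    simp only [ambiguous_template_alt_loop, pvPriceSum, pvTitleSum, List.map_cons, List.sum_cons]
       at *
    by_cases hx : x = "{price}"
    · have hxt : x ≠ "{title}" := by rw [hx]; decide
      simp only [if_pos hx, if_neg hxt]
      by_cases h1 : p + 1 > 1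
      · rw [if_pos h1]
        symm; simp only [decide_eq_true_iff]; left; omega
      · simp only [if_neg h1]
        rw [ih (p + 1) t (by omega) ht]
        rw [decide_eq_decide]
        omega
    · simp only [if_neg hx]
      by_cases hx2 : x = "{title}"
      · simp only [if_pos hx2]
        by_cases h2 : t + 1 > 1
        · rw [if_pos h2]
          symm; simp only [decide_eq_true_iff]; right; omega
        · simp only [if_neg h2]
          rw [ih p (t + 1) hp (by omega)]
          rw [decide_eq_decide]
          omega
      · simp only [if_neg hx2]
        rw [ih p t hp ht]
        rw [decide_eq_decide]
        omega

-- ===== VERDICT (by name: the statement is the Claim_ definition above) =====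
theorem ambiguous_template_spec : Claim_equal_ambiguous_template := by
  intro template _
  unfold Spec_ambiguous_template ambiguous_template ambiguous_template_alt
  by_cases h : template.length = 0
  · simp [h]
  · rw [if_neg h, if_neg h]
    rw [alt_loop_eq template 0 0 (by omega) (by omega)]
    have hps := pvPriceSum_nonneg template
    have hts := pvTitleSum_nonneg template
    show (if pvPriceSum template > 1 then true else if pvTitleSum template > 1 then true else false) = _
    by_cases h1 : pvPriceSum template > 1
    · rw [if_pos h1]; symm; simp only [decide_eq_true_iff]; left; omega
    · rw [if_neg h1]
      by_cases h2 : pvTitleSum template > 1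
      · rw [if_pos h2]; symm; simp only [decide_eq_true_iff]; right; omega
      · rw [if_neg h2]; symm; simp only [decide_eq_false_iff_not]; push_neg; exact ⟨by omega, by omega⟩
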